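-- pv_equiv track=rewrite | github.com/kovacsszilard/python | hazi1125.py | jegyek_szama
-- ===== SOURCE A (Python) =====
-- def jegyek_szama(lista):    # a függvény
--     db_egyjegyu: int=0
--     db_ketjegyu: int=0
--     db_haromjegyu: int=0
--     db_negyjegyu: int=0
--     for i in range(len(lista)):
--          if  lista[i]<10:
--              db_egyjegyu+=1
--
--          if lista[i]>9 and lista[i]<100:
--              db_ketjegyu+=1
--
--
--          if lista[i]>99 and lista[i]<1000:
--              db_haromjegyu+=1
--
--          if lista[i]>999:
--              db_negyjegyu+=1
--
--     return db_egyjegyu,db_ketjegyu,db_haromjegyu,db_negyjegyu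
-- ===== SOURCE B (Python) =====
-- def _bisect_right(ts, x):
--     # binary search: first index i with x < ts[i] (ts sorted ascending)
--     lo, hi = 0, len(ts)
--     while lo < hi:
--         mid = (lo + hi) // 2
--         if x < ts[mid]:
--             hi = mid
--         else:
--             lo = mid + 1
--     return lo
--
--
-- def jegyek_szama(lista):
--     thresholds = [10, 100, 1000]
--     counts = [0, 0, 0, 0]
--     for x in lista:
--         counts[_bisect_right(thresholds, x)] += 1
--     return tuple(counts)
-- ===== Notes on version B (the rewrite author's own statement) =====
-- stated objective: alternative
-- what changed: Replaces A's four independent range comparisons per element with a single hand-written binary search (bisect_right) into a sorted three-element threshold table that indexes into a counts array, then returns tuple(counts).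
import Mathlib
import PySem

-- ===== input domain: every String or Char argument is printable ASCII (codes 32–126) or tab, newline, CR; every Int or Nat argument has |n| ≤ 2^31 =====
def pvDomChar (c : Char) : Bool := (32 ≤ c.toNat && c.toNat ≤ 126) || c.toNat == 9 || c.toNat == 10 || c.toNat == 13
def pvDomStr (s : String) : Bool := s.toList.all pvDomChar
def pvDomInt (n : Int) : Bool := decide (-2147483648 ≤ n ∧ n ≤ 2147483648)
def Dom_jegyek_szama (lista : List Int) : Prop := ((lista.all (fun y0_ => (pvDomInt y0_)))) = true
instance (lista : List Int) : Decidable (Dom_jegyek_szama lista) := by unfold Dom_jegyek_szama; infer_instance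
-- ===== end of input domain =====

-- B replaces A's four range tests per element by a binary search into a sorted
-- threshold table indexing a counts array (alternative algorithm, same cost).
-- ===== PORT A =====
def pvStepA (s : Int × Int × Int × Int) (x : Int) : Int × Int × Int × Int :=
  let s1 := if x < 10 then (s.1 + 1, s.2.1, s.2.2.1, s.2.2.2) else s
  let s2 := if x > 9 ∧ x < 100 then (s1.1, s1.2.1 + 1, s1.2.2.1, s1.2.2.2) else s1
  let s3 := if x > 99 ∧ x < 1000 then (s2.1, s2.2.1, s2.2.2.1 + 1, s2.2.2.2) else s2
  if x > 999 then (s3.1, s3.2.1, s3.2.2.1, s3.2.2.2 + 1) else s3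

def jegyek_szama (lista : List Int) : Int × Int × Int × Int :=
  (PySem.List.pyRange 0 lista.length 1).foldl
    (fun s i => pvStepA s (PySem.List.pyGetD lista i 0)) (0, 0, 0, 0)

-- ===== PORT B =====
-- hand-written binary search from Source B; ts[mid] is always in range here (exact)
def pvBrAux (ts : List Int) (x : Int) (lo hi : Nat) : Nat :=
  if _h : lo < hi then
    let mid := (lo + hi) / 2
    if x < ts.getD mid 0 then pvBrAux ts x lo mid else pvBrAux ts x (mid + 1) hi
  else lo
termination_by hi - lo

def pvBisectRight (ts : List Int) (x : Int) : Nat :=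
  pvBrAux ts x 0 ts.length

def jegyek_szama_alt (lista : List Int) : Int × Int × Int × Int :=
  let thresholds : List Int := [10, 100, 1000]
  let counts : List Int :=
    lista.foldl
      (fun cs x =>
        let i := pvBisectRight thresholds x
        cs.set i (cs.getD i 0 + 1))
      [0, 0, 0, 0]
  (counts.getD 0 0, counts.getD 1 0, counts.getD 2 0, counts.getD 3 0)

-- ===== PRECONDITION & SPEC =====
def Spec_jegyek_szama (lista : List Int) (out : Int × Int × Int × Int) : Prop := out = jegyek_szama_alt lista
instance (lista : List Int) (out : Int × Int × Int × Int) : Decidable (Spec_jegyek_szama lista out) := by unfold Spec_jegyek_szama; infer_instance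

-- ===== CLAIM =====
def Claim_equal_jegyek_szama : Prop := ∀ (lista : List Int), Dom_jegyek_szama lista → Spec_jegyek_szama lista (jegyek_szama lista)

-- ===== LEMMAS AND PROOFS =====
theorem pvBisect_eval (x : Int) :
    pvBisectRight [10, 100, 1000] x =
      if x < 10 then 0 else if x < 100 then 1 else if x < 1000 then 2 else 3 := by
  unfold pvBisectRight
  rw [pvBrAux]; norm_num
  split_ifs with h1 h2 h3 h4 <;>
    · rw [pvBrAux]; norm_num
      split_ifs <;> first | rfl | omega | (rw [pvBrAux]; norm_num)

theorem pvStepA0 (x a b c d : Int) (h : x < 10) : pvStepA (a, b, c, d) x = (a + 1, b, c, d) := by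
  simp only [pvStepA]; split_ifs <;> first | rfl | omega

theorem pvStepA1 (x a b c d : Int) (h1 : ¬ x < 10) (h2 : x < 100) : pvStepA (a, b, c, d) x = (a, b + 1, c, d) := by
  simp only [pvStepA]; split_ifs <;> first | rfl | omega

theorem pvStepA2 (x a b c d : Int) (h1 : ¬ x < 100) (h2 : x < 1000) : pvStepA (a, b, c, d) x = (a, b, c + 1, d) := by
  simp only [pvStepA]; split_ifs <;> first | rfl | omega

theorem pvStepA3 (x a b c d : Int) (h1 : ¬ x < 1000) : pvStepA (a, b, c, d) x = (a, b, c, d + 1) := by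
  simp only [pvStepA]; split_ifs <;> first | rfl | omega

theorem pvKey (l : List Int) (a b c d : Int) :
    l.foldl (fun s x => pvStepA s x) (a, b, c, d)
      = (fun cs : List Int => (cs.getD 0 0, cs.getD 1 0, cs.getD 2 0, cs.getD 3 0))
          (l.foldl (fun cs x => let i := pvBisectRight [10, 100, 1000] x;
                                cs.set i (cs.getD i 0 + 1)) [a, b, c, d]) := by
  induction l generalizing a b c d with
  | nil => simp
  | cons x l ih =>
      simp only [List.foldl_cons, pvBisect_eval x]
      by_cases h1 : x < 10
      · rw [pvStepA0 x a b c d h1, if_pos h1]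
        simpa using ih (a + 1) b c d
      · rw [if_neg h1]
        by_cases h2 : x < 100
        · rw [pvStepA1 x a b c d h1 h2, if_pos h2]
          simpa using ih a (b + 1) c d
        · rw [if_neg h2]
          by_cases h3 : x < 1000
          · rw [pvStepA2 x a b c d h2 h3, if_pos h3]
            simpa using ih a b (c + 1) d
          · rw [pvStepA3 x a b c d h3, if_neg h3]
            simpa using ih a b c (d + 1)

-- ===== VERDICT =====
theorem jegyek_szama_spec : Claim_equal_jegyek_szama := by
  intro lista _
  unfold Spec_jegyek_szama jegyek_szama jegyek_szama_alt
  rw [PySem.List.foldl_pyRange_zero_pyGetD' lista 0 (fun s x => pvStepA s x) (0, 0, 0, 0)]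
  exact pvKey lista 0 0 0 0
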